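-- pv_equiv track=rewrite | github.com/danielmh111/bristol_osm_features | main.py | matches_poi
-- ===== SOURCE A (Python) =====
-- def matches_poi(
--     tags: dict,
--     poi: str,
-- ) -> bool:
--     category_keys = {"amenity", "shop", "landuse", "highway"}
--     for key in category_keys:
--         if tags.get(key) == poi:
--             return True
--     return poi in tags.keys()
-- ===== SOURCE B (Python) =====
-- CATEGORY_KEYS = {"amenity", "shop", "landuse", "highway"}
--
--
-- def matches_poi(
--     tags: dict,
--     poi: str,
-- ) -> bool:
--     for key, value in tags.items():
--         if key == poi:
--             return True
--         if key in CATEGORY_KEYS and value == poi: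
--             return True
--     return False
-- ===== Notes on version B (the rewrite author's own statement) =====
-- stated objective: alternative
-- what changed: B makes a single early-exit pass over the tag entries themselves (key==poi, or key in the category set with value==poi) instead of A's fixed scan over the four category keys followed by a separate key-membership test.
import Mathlib
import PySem

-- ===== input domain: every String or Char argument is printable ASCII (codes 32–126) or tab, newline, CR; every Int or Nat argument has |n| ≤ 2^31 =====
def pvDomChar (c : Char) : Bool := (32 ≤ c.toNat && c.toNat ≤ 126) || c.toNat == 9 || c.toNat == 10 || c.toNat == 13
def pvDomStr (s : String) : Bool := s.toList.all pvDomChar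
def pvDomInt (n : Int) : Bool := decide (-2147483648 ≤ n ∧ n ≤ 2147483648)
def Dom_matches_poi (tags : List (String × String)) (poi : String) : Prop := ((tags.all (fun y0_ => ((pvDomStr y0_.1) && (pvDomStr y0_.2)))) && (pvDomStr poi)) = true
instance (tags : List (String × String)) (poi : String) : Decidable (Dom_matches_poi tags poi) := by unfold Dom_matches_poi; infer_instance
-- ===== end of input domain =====

-- B replaces A's fixed-key scan + membership test by one early-exit pass over the tag entries (alternative decomposition).
-- Equivalence of the return value; Pre_ keeps the Python-dict invariant (no duplicate keys), which every real dict satisfies.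
-- ===== PORT A =====
-- dict.get(key): first matching entry of the association list (Python dicts have unique keys).
def pvDictGet (tags : List (String × String)) (k : String) : Option String :=
  match tags with
  | [] => none
  | (k', v) :: t => if k' == k then some v else pvDictGet t k

def matches_poi (tags : List (String × String)) (poi : String) : Bool :=
  -- for key in category_keys: if tags.get(key) == poi: return True   (set order is irrelevant to the result)
  if pvDictGet tags "amenity" == some poi then true
  else if pvDictGet tags "shop" == some poi then true
  else if pvDictGet tags "landuse" == some poi then true
  else if pvDictGet tags "highway" == some poi then true
  else tags.any (fun p => p.1 == poi)   -- poi in tags.keys()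

-- ===== PORT B =====
def pvCategoryKeys : List String := ["amenity", "shop", "landuse", "highway"]

def matches_poi_alt (tags : List (String × String)) (poi : String) : Bool :=
  match tags with
  | [] => false
  | (k, v) :: t =>
    if k == poi then true
    else if pvCategoryKeys.contains k && v == poi then true
    else matches_poi_alt t poi

-- ===== PRECONDITION & SPEC =====
-- Pre_ states the Python-dict invariant: keys are pairwise distinct. Duplicate-key association
-- lists cannot arise from a Python dict argument, so nothing A accepts is excluded.
def Pre_matches_poi (tags : List (String × String)) (poi : String) : Prop :=
  (tags.map Prod.fst).Nodup
instance (tags : List (String × String)) (poi : String) : Decidable (Pre_matches_poi tags poi) := by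
  unfold Pre_matches_poi; infer_instance

def pvWitness_matches_poi : (List (String × String)) × String := ([("amenity", "cafe"), ("name", "Roll for the Soul")], "cafe")

def Spec_matches_poi (tags : List (String × String)) (poi : String) (out : Bool) : Prop := out = matches_poi_alt tags poi
instance (tags : List (String × String)) (poi : String) (out : Bool) : Decidable (Spec_matches_poi tags poi out) := by unfold Spec_matches_poi; infer_instance

-- ===== CLAIM (what is proved, stated in full; the proofs are below) =====
def Claim_equal_matches_poi : Prop := ∀ (tags : List (String × String)) (poi : String), Dom_matches_poi tags poi → Pre_matches_poi tags poi → Spec_matches_poi tags poi (matches_poi tags poi)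

-- ===== LEMMAS AND PROOFS =====

-- Under unique keys, first-match lookup returning `some poi` is exactly membership of (k, poi).
theorem pvDictGet_eq_some_iff (tags : List (String × String)) (k poi : String)
    (h : (tags.map Prod.fst).Nodup) :
    pvDictGet tags k = some poi ↔ (k, poi) ∈ tags := by
  induction tags with
  | nil => simp [pvDictGet]
  | cons p t ih =>
    obtain ⟨k', v⟩ := p
    simp only [List.map_cons, List.nodup_cons] at h
    by_cases hk : k' = k
    · subst hk
      simp only [pvDictGet, beq_self_eq_true, if_true, List.mem_cons, Option.some_inj,
        Prod.mk.injEq]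
      constructor
      · rintro rfl; exact Or.inl ⟨trivial, rfl⟩
      · rintro (⟨-, rfl⟩ | hm)
        · rfl
        · exact absurd (List.mem_map_of_mem hm) h.1
    · simp only [pvDictGet, beq_iff_eq, hk, if_false, List.mem_cons, Prod.mk.injEq]
      rw [ih h.2]
      constructor
      · exact Or.inr
      · rintro (⟨hke, -⟩ | hm)
        · exact absurd hke.symm hk
        · exact hm

-- B is an early-exit `any` over the entries.
theorem matches_poi_alt_eq_any (tags : List (String × String)) (poi : String) :
    matches_poi_alt tags poi
      = tags.any (fun p => p.1 == poi || (pvCategoryKeys.contains p.1 && p.2 == poi)) := by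
  induction tags with
  | nil => rfl
  | cons p t ih =>
    obtain ⟨k, v⟩ := p
    simp only [matches_poi_alt, List.any_cons, ih]
    cases h1 : (k == poi) <;> cases h2 : (pvCategoryKeys.contains k && (v == poi)) <;>
      simp_all

-- ===== VERDICT (by name: the statement is the Claim_ definition above) =====
theorem matches_poi_spec : Claim_equal_matches_poi := by
  intro tags poi _ hpre
  unfold Spec_matches_poi
  rw [matches_poi_alt_eq_any]
  unfold matches_poi
  have hg := fun k => pvDictGet_eq_some_iff tags k poi hpre
  rw [Bool.eq_iff_iff]
  simp only [Bool.if_true_left, Bool.or_eq_true, beq_iff_eq, hg,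
    List.any_eq_true, Bool.and_eq_true, List.contains_eq_mem, decide_eq_true_eq,
    pvCategoryKeys]
  constructor
  · rintro (hm | hm | hm | hm | ⟨p, hp, rfl⟩)
    · exact ⟨_, hm, Or.inr ⟨by simp, rfl⟩⟩
    · exact ⟨_, hm, Or.inr ⟨by simp, rfl⟩⟩
    · exact ⟨_, hm, Or.inr ⟨by simp, rfl⟩⟩
    · exact ⟨_, hm, Or.inr ⟨by simp, rfl⟩⟩
    · exact ⟨p, hp, Or.inl rfl⟩
  · rintro ⟨⟨k, v⟩, hp, (rfl | ⟨hk, rfl⟩)⟩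
    · exact Or.inr (Or.inr (Or.inr (Or.inr ⟨_, hp, rfl⟩)))
    · simp only [List.mem_cons, List.not_mem_nil, or_false] at hk
      rcases hk with rfl | rfl | rfl | rfl
      · exact Or.inl hp
      · exact Or.inr (Or.inl hp)
      · exact Or.inr (Or.inr (Or.inl hp))
      · exact Or.inr (Or.inr (Or.inr (Or.inl hp)))
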